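-- pv_equiv track=rewrite | github.com/struggling-student/PythonExercises | PythonExercises/Esami/2020-2021/esame-31-3-21/program.andrea.py | enum_tri
-- ===== SOURCE A (Python) =====
-- def enum_tri(n, bits=''):
--     alphabet = '012'
--     if n <= 0:
--         if not bits:
--             return [('', None, None)]
--         else:
--             int_v = int(bits, base=len(alphabet))
--             int_bits = int_v.bit_length()
--             # to code 0 we still need a bit, right?
--             if int_v == 0:
--                 int_bits += 1
--             return [(bits, int_v, int_bits)]
--     digits = []
--     for c in alphabet:
--         digits.extend(enum_tri(n-1, bits=bits+c))
--     return  digits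
-- ===== SOURCE B (Python) =====
-- def enum_tri(n, bits=''):
--     alphabet = '012'
--     # breadth-first layer expansion instead of A's DFS recursion
--     words = [bits]
--     if n > 0:
--         for _ in range(n):
--             words = [w + c for w in words for c in alphabet]
--     res = []
--     for w in words:
--         if not w:
--             res.append((w, None, None))
--         else:
--             v = int(w, base=len(alphabet))
--             res.append((w, v, v.bit_length() or 1))
--     return res
-- ===== Notes on version B (the rewrite author's own statement) =====
-- stated objective: alternative
-- what changed: Replaces A's depth-first recursion (recursive calls extending a prefix, concatenating child results) by an iterative breadth-first layer expansion of the word list followed by a single mapping pass that computes each word's base-3 value and bit length.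
import Mathlib
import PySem

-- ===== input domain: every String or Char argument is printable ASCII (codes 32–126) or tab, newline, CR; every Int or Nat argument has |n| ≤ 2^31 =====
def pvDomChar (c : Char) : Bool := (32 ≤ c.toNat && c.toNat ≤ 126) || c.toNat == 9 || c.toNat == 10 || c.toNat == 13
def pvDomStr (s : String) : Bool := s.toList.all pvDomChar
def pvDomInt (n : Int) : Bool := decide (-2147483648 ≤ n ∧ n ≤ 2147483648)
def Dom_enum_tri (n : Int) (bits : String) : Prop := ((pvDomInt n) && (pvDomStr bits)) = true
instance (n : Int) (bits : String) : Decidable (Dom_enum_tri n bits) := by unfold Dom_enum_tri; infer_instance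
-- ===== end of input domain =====

-- B replaces A's depth-first recursion by iterative breadth-first layer expansion of the word
-- list, then one mapping pass computing value/bit-length (objective: alternative decomposition;
-- same asymptotic cost).

-- shared exact models of Python primitives used by BOTH sources (A and B both call int(s, 3)
-- and int.bit_length): whitespace per Python's int() stripping, base-3 digit value, underscore
-- handling, and bit_length as repeated halving.
def pyIntWs (c : Char) : Bool :=
  c == ' ' || c == '\t' || c == '\n' || c == '\r' || c == '\x0b' || c == '\x0c'

def isTriDigit (c : Char) : Bool := c == '0' || c == '1' || c == '2'

def triDigitVal (c : Char) : Int := if c == '1' then 1 else if c == '2' then 2 else 0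

-- the characters int(s, 3) actually parses: strip whitespace on both ends, optional sign kept
def stripSides (l : List Char) : List Char :=
  ((l.dropWhile pyIntWs).reverse.dropWhile pyIntWs).reverse

-- exact value of Python int(s, base=3) on every string it accepts (junk value elsewhere)
def parse3 (l : List Char) : Int :=
  let core := stripSides l
  let (sign, body) : Int × List Char :=
    match core with
    | '+' :: r => (1, r)
    | '-' :: r => (-1, r)
    | r => (1, r)
  sign * (body.filter (fun c => c ≠ '_')).foldl (fun a c => 3 * a + triDigitVal c) 0

-- exact Python int.bit_length on the absolute value
def pyBitLength (m : Nat) : Nat :=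
  if m = 0 then 0 else pyBitLength (m / 2) + 1
termination_by m
decreasing_by exact Nat.div_lt_self (Nat.pos_of_ne_zero (by assumption)) (by omega)

-- ===== PORT A =====
def enum_tri (n : Int) (bits : String) : List (String × Option Int × Option Int) :=
  if n ≤ 0 then
    if bits = "" then [("", none, none)]
    else
      let intV : Int := parse3 bits.toList
      let intBits : Int := (pyBitLength intV.natAbs : Int)
      let intBits := if intV = 0 then intBits + 1 else intBits
      [(bits, some intV, some intBits)]
  else
    "012".toList.foldl (fun digits c => digits ++ enum_tri (n - 1) (bits.push c)) []
termination_by n.toNat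
decreasing_by omega

-- ===== PORT B =====
def enum_tri_alt (n : Int) (bits : String) : List (String × Option Int × Option Int) :=
  let words : List String :=
    if n > 0 then
      (List.range n.toNat).foldl
        (fun ws _ => ws.flatMap (fun w => "012".toList.map (fun c => w.push c))) [bits]
    else [bits]
  words.map (fun w =>
    if w = "" then (w, none, none)
    else
      let v : Int := parse3 w.toList
      let b : Int := (pyBitLength v.natAbs : Int)
      (w, some v, some (if b = 0 then 1 else b)))

-- ===== PRECONDITION & SPEC =====
-- whether int(s, 3) accepts a string: after stripping whitespace and an optional sign, a
-- nonempty run of base-3 digits with single underscores only between digits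
def triDigitsTail : List Char → Bool
  | [] => true
  | '_' :: c :: rest => isTriDigit c && triDigitsTail rest
  | c :: rest => isTriDigit c && triDigitsTail rest

def accepts3 (l : List Char) : Bool :=
  let core := stripSides l
  let body := match core with
    | '+' :: r => r
    | '-' :: r => r
    | r => r
  match body with
  | [] => false
  | c :: rest => isTriDigit c && triDigitsTail rest

-- Pre_ excludes exactly the inputs on which Python A raises ValueError from int(_, base=3):
-- for n ≤ 0 the string bits itself must be empty or a valid base-3 literal, for n > 0 every
-- emitted word bits + suffix must be one, which holds iff bits followed by a digit is.
def Pre_enum_tri (n : Int) (bits : String) : Prop :=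
  if n ≤ 0 then bits = "" ∨ accepts3 bits.toList = true
  else accepts3 (bits.toList ++ ['0']) = true
instance (n : Int) (bits : String) : Decidable (Pre_enum_tri n bits) := by
  unfold Pre_enum_tri; infer_instance

def pvWitness_enum_tri : Int × String := (2, "1")

def Spec_enum_tri (n : Int) (bits : String) (out : List (String × Option Int × Option Int)) : Prop := out = enum_tri_alt n bits
instance (n : Int) (bits : String) (out : List (String × Option Int × Option Int)) : Decidable (Spec_enum_tri n bits out) := by unfold Spec_enum_tri; infer_instance

-- ===== CLAIM (what is proved, stated in full; the proofs are below) =====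
def Claim_equal_enum_tri : Prop := ∀ (n : Int) (bits : String), Dom_enum_tri n bits → Pre_enum_tri n bits → Spec_enum_tri n bits (enum_tri n bits)

-- ===== LEMMAS AND PROOFS =====

-- B's per-word mapping function, as a name for the proofs
def triInfo (w : String) : String × Option Int × Option Int :=
  if w = "" then (w, none, none)
  else
    let v : Int := parse3 w.toList
    let b : Int := (pyBitLength v.natAbs : Int)
    (w, some v, some (if b = 0 then 1 else b))

-- the DFS word list of A
def triDfs : Nat → String → List String
  | 0, b => [b]
  | k + 1, b => "012".toList.flatMap (fun c => triDfs k (b.push c))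

theorem my_flatMap_congr {α β : Type} (l : List α) (f g : α → List β)
    (h : ∀ x ∈ l, f x = g x) : l.flatMap f = l.flatMap g := by
  induction l with
  | nil => rfl
  | cons a l ih =>
    simp only [List.flatMap_cons]
    rw [h a (List.mem_cons_self), ih (fun x hx => h x (List.mem_cons_of_mem a hx))]

theorem my_flatMap_assoc {α β γ : Type} (l : List α) (f : α → List β) (g : β → List γ) :
    (l.flatMap f).flatMap g = l.flatMap (fun x => (f x).flatMap g) := by
  induction l with
  | nil => rfl
  | cons a l ih => simp [List.flatMap_cons, List.flatMap_append, ih]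

theorem my_map_flatMap {α β γ : Type} (l : List α) (f : α → List β) (g : β → γ) :
    (l.flatMap f).map g = l.flatMap (fun x => (f x).map g) := by
  induction l with
  | nil => rfl
  | cons a l ih => simp [List.flatMap_cons, ih]

theorem my_flatMap_id {α : Type} (l : List α) : l.flatMap (fun x => [x]) = l := by
  induction l with
  | nil => rfl
  | cons a l ih => simp [List.flatMap_cons, ih]

theorem pyBitLength_eq_zero_iff (m : Nat) : pyBitLength m = 0 ↔ m = 0 := by
  constructor
  · intro h
    by_contra hm
    rw [pyBitLength] at h
    simp [hm] at h
  · intro h; subst h; rw [pyBitLength]; simp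

-- A's leaf equals B's mapping function
theorem leaf_eq_triInfo (bits : String) :
    (if bits = "" then [("", none, none)]
     else
       let intV : Int := parse3 bits.toList
       let intBits : Int := (pyBitLength intV.natAbs : Int)
       let intBits := if intV = 0 then intBits + 1 else intBits
       [(bits, some intV, some intBits)]) = [triInfo bits] := by
  by_cases h : bits = ""
  · subst h; simp [triInfo]
  · by_cases hv : parse3 bits.toList = 0
    · simp [triInfo, h, hv, pyBitLength]
    · have hb : pyBitLength (parse3 bits.toList).natAbs ≠ 0 := by
        rw [Ne, pyBitLength_eq_zero_iff]
        simpa using hv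
      simp [triInfo, h, hv]
      intro h'
      exact absurd h' hb

theorem enum_tri_eq_dfs_map (k : Nat) :
    ∀ (n : Int) (bits : String), n.toNat = k →
      enum_tri n bits = (triDfs k bits).map triInfo := by
  induction k with
  | zero =>
    intro n bits hk
    have hn : n ≤ 0 := by omega
    rw [enum_tri, if_pos hn, triDfs]
    simpa using leaf_eq_triInfo bits
  | succ k ih =>
    intro n bits hk
    have hn : ¬ n ≤ 0 := by omega
    rw [enum_tri, if_neg hn]
    rw [PySem.List.foldl_append_eq_flatMap]
    show [] ++ _ = _
    rw [List.nil_append, triDfs, my_map_flatMap]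
    exact my_flatMap_congr _ _ _ (fun c _ => ih (n - 1) (bits.push c) (by omega))

-- one BFS layer applied to a DFS list expands every leaf
theorem triDfs_succ_flatMap (k : Nat) (b : String) :
    triDfs (k + 1) b = (triDfs k b).flatMap (fun w => "012".toList.map (fun c => w.push c)) := by
  induction k generalizing b with
  | zero => simp [triDfs]
  | succ k ih =>
    calc triDfs (k + 1 + 1) b
        = "012".toList.flatMap (fun c => triDfs (k + 1) (b.push c)) := by rw [triDfs]
      _ = "012".toList.flatMap
            (fun c => (triDfs k (b.push c)).flatMap
              (fun w => "012".toList.map (fun d => w.push d))) :=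
          my_flatMap_congr _ _ _ (fun c _ => ih (b.push c))
      _ = ("012".toList.flatMap (fun c => triDfs k (b.push c))).flatMap
            (fun w => "012".toList.map (fun d => w.push d)) :=
          (my_flatMap_assoc _ _ _).symm
      _ = (triDfs (k + 1) b).flatMap (fun w => "012".toList.map (fun d => w.push d)) := by
          rw [triDfs]

-- the BFS fold equals flatMapping the DFS list
theorem bfs_eq_flatMap_dfs (k : Nat) :
    ∀ ws : List String,
      (List.range k).foldl
        (fun ws _ => ws.flatMap (fun w => "012".toList.map (fun c => w.push c))) ws
      = ws.flatMap (triDfs k) := by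
  induction k with
  | zero =>
    intro ws
    simp only [List.range_zero, List.foldl_nil]
    exact ((my_flatMap_congr ws _ _ (fun x _ => rfl)).trans (my_flatMap_id ws)).symm
  | succ k ih =>
    intro ws
    rw [List.range_succ, List.foldl_append, ih]
    simp only [List.foldl_cons, List.foldl_nil]
    rw [my_flatMap_assoc]
    exact my_flatMap_congr _ _ _ (fun w _ => (triDfs_succ_flatMap k w).symm)

theorem enum_tri_eq_alt (n : Int) (bits : String) : enum_tri n bits = enum_tri_alt n bits := by
  unfold enum_tri_alt
  by_cases hn : n > 0
  · simp only [if_pos hn]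
    rw [bfs_eq_flatMap_dfs, List.flatMap_singleton]
    rw [enum_tri_eq_dfs_map n.toNat n bits rfl]
    rfl
  · simp only [if_neg hn]
    have h0 : n.toNat = 0 := by omega
    rw [enum_tri_eq_dfs_map 0 n bits h0, triDfs]
    rfl

-- ===== VERDICT (by name: the statement is the Claim_ definition above) =====
theorem enum_tri_spec : Claim_equal_enum_tri := by
  intro n bits _ _
  unfold Spec_enum_tri
  exact enum_tri_eq_alt n bits
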